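-- pv_equiv track=rewrite | github.com/moatazessam32-ops/premium-league-bot | cogs/utils.py | normalize_map_name
-- ===== SOURCE A (Python) =====
-- MAPS = [
--     "Sub Base",
--     "Black Widow",
--     "Mexico",
--     "Ankara",
--     "Port",
--     "Compound",
--     "EAGLE EYE 2.0"
-- ]
--
-- def normalize_map_name(name):
--     """Normalize incoming map name to match MAPS list exactly."""
--     if not name:
--         return None
--
--     name = name.strip().lower()
--
--     # Exact match
--     for m in MAPS:
--         if m.lower() == name:
--             return m
--
--     # Ignore spaces, underscores
--     for m in MAPS:
--         if name.replace(" ", "").replace("_", "") == m.lower().replace(" ", "").replace("_", ""):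
--             return m
--
--     # Fuzzy match
--     for m in MAPS:
--         if name in m.lower():
--             return m
--
--     return None
-- ===== SOURCE B (Python) =====
-- MAPS = [
--     "Sub Base",
--     "Black Widow",
--     "Mexico",
--     "Ankara",
--     "Port",
--     "Compound",
--     "EAGLE EYE 2.0"
-- ]
--
-- def normalize_map_name(name):
--     """Single scored pass over MAPS instead of three sequential scans."""
--     if not name:
--         return None
--     name = name.strip().lower()
--     squeezed = name.replace(" ", "").replace("_", "")
--     best = None
--     best_rank = 4
--     for m in MAPS:
--         ml = m.lower()
--         if ml == name:
--             rank = 1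
--         elif squeezed == ml.replace(" ", "").replace("_", ""):
--             rank = 2
--         elif name in ml:
--             rank = 3
--         else:
--             continue
--         if rank < best_rank:
--             best, best_rank = m, rank
--     return best
-- ===== Notes on version B (the rewrite author's own statement) =====
-- stated objective: alternative
-- what changed: Replaced A's three sequential scans of MAPS (exact, space/underscore-insensitive, substring) by one scored pass that ranks each map 1/2/3 and keeps the first map with the strictly smallest rank.
import Mathlib
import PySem

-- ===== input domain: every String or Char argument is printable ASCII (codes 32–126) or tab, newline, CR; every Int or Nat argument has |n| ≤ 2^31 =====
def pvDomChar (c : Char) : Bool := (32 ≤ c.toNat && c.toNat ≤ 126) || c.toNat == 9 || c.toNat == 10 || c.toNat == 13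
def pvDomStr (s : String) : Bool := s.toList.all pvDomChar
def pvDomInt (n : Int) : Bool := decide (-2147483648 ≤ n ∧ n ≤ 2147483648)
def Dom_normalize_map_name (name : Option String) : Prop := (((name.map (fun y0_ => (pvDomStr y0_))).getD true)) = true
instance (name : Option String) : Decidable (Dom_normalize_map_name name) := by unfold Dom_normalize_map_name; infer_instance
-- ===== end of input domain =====

-- B replaces A's three sequential scans of MAPS by ONE scored pass (rank 1 exact,
-- 2 space/underscore-insensitive, 3 substring; strictly-smaller-rank updates keep
-- the first match of each tier); objective: alternative single-pass decomposition.

-- ===== PORT A =====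
def MAPS : List String :=
  ["Sub Base", "Black Widow", "Mexico", "Ankara", "Port", "Compound", "EAGLE EYE 2.0"]

def normalize_map_name (name : Option String) : Option String :=
  match name with
  | none => none
  | some s =>
    if s = "" then none
    else
      let nm := PySem.Str.lower (PySem.Str.strip s)
      match MAPS.find? (fun m => PySem.Str.lower m == nm) with
      | some m => some m
      | none =>
        match MAPS.find? (fun m =>
            PySem.Str.replace (PySem.Str.replace nm " " "") "_" "" ==
            PySem.Str.replace (PySem.Str.replace (PySem.Str.lower m) " " "") "_" "") with
        | some m => some m
        | none =>
          match MAPS.find? (fun m => PySem.Str.isIn nm (PySem.Str.lower m)) with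
          | some m => some m
          | none => none

-- ===== PORT B =====
def pvSqueeze (s : String) : String :=
  PySem.Str.replace (PySem.Str.replace s " " "") "_" ""

def pvRank (p1 p2 p3 : String → Bool) (m : String) : Nat :=
  if p1 m then 1 else if p2 m then 2 else if p3 m then 3 else 4

def pvBest (p1 p2 p3 : String → Bool) (maps : List String)
    (acc : Option String × Nat) : Option String × Nat :=
  maps.foldl (fun acc m =>
    let r := pvRank p1 p2 p3 m
    if r < acc.2 then (some m, r) else acc) acc

def normalize_map_name_alt (name : Option String) : Option String :=
  match name with
  | none => none
  | some s =>
    if s = "" then none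
    else
      let nm := PySem.Str.lower (PySem.Str.strip s)
      let sq := pvSqueeze nm
      (pvBest (fun m => PySem.Str.lower m == nm)
              (fun m => sq == pvSqueeze (PySem.Str.lower m))
              (fun m => PySem.Str.isIn nm (PySem.Str.lower m))
              MAPS (none, 4)).1

-- ===== PRECONDITION & SPEC =====
def Spec_normalize_map_name (name : Option String) (out : Option String) : Prop := out = normalize_map_name_alt name
instance (name : Option String) (out : Option String) : Decidable (Spec_normalize_map_name name out) := by unfold Spec_normalize_map_name; infer_instance

-- ===== CLAIM (what is proved, stated in full; the proofs are below) =====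
def Claim_equal_normalize_map_name : Prop := ∀ (name : Option String), Dom_normalize_map_name name → Spec_normalize_map_name name (normalize_map_name name)

-- ===== LEMMAS AND PROOFS =====
theorem pvRank_pos (p1 p2 p3 : String → Bool) (m : String) : 1 ≤ pvRank p1 p2 p3 m := by
  unfold pvRank; split_ifs <;> omega

theorem pvBest_cons (p1 p2 p3 : String → Bool) (m : String) (t : List String)
    (acc : Option String × Nat) :
    pvBest p1 p2 p3 (m :: t) acc =
      pvBest p1 p2 p3 t
        (if pvRank p1 p2 p3 m < acc.2 then (some m, pvRank p1 p2 p3 m) else acc) := by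
  simp [pvBest, List.foldl]

theorem pvBest_one (p1 p2 p3 : String → Bool) (maps : List String) (b : Option String) :
    pvBest p1 p2 p3 maps (b, 1) = (b, 1) := by
  induction maps with
  | nil => rfl
  | cons m t ih =>
    rw [pvBest_cons]
    have := pvRank_pos p1 p2 p3 m
    have h : ¬ pvRank p1 p2 p3 m < (b, 1).2 := by simp; omega
    rw [if_neg h, ih]

theorem pvBest_two (p1 p2 p3 : String → Bool) (maps : List String) (b : Option String) :
    (pvBest p1 p2 p3 maps (b, 2)).1 =
      match maps.find? p1 with
      | some m => some m
      | none => b := by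
  induction maps with
  | nil => rfl
  | cons m t ih =>
    rw [pvBest_cons]
    by_cases h1 : p1 m
    · have hr : pvRank p1 p2 p3 m = 1 := by simp [pvRank, h1]
      rw [hr]; simp [pvBest_one, List.find?, h1]
    · have hr : 2 ≤ pvRank p1 p2 p3 m := by simp [pvRank, h1]; split_ifs <;> omega
      have h : ¬ pvRank p1 p2 p3 m < ((b : Option String), 2).2 := by simp; omega
      rw [if_neg h, ih]; simp [List.find?, h1]

theorem pvBest_three (p1 p2 p3 : String → Bool) (maps : List String) (b : Option String) :
    (pvBest p1 p2 p3 maps (b, 3)).1 =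
      match maps.find? p1 with
      | some m => some m
      | none =>
        match maps.find? p2 with
        | some m => some m
        | none => b := by
  induction maps with
  | nil => rfl
  | cons m t ih =>
    rw [pvBest_cons]
    by_cases h1 : p1 m
    · have hr : pvRank p1 p2 p3 m = 1 := by simp [pvRank, h1]
      rw [hr]; simp [pvBest_one, List.find?, h1]
    · by_cases h2 : p2 m
      · have hr : pvRank p1 p2 p3 m = 2 := by simp [pvRank, h1, h2]
        rw [hr]; simp only [show ((2:Nat) < ((b : Option String), 3).2) = True by simp, if_true]
        rw [pvBest_two]
        simp [List.find?, h1, h2]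
      · have hr : 3 ≤ pvRank p1 p2 p3 m := by simp [pvRank, h1, h2]; split_ifs <;> omega
        have h : ¬ pvRank p1 p2 p3 m < ((b : Option String), 3).2 := by simp; omega
        rw [if_neg h, ih]; simp [List.find?, h1, h2]

theorem pvBest_four (p1 p2 p3 : String → Bool) (maps : List String) (b : Option String) :
    (pvBest p1 p2 p3 maps (b, 4)).1 =
      match maps.find? p1 with
      | some m => some m
      | none =>
        match maps.find? p2 with
        | some m => some m
        | none =>
          match maps.find? p3 with
          | some m => some m
          | none => b := by
  induction maps with
  | nil => rfl
  | cons m t ih =>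
    rw [pvBest_cons]
    by_cases h1 : p1 m
    · have hr : pvRank p1 p2 p3 m = 1 := by simp [pvRank, h1]
      rw [hr]; simp [pvBest_one, List.find?, h1]
    · by_cases h2 : p2 m
      · have hr : pvRank p1 p2 p3 m = 2 := by simp [pvRank, h1, h2]
        rw [hr]; simp only [show ((2:Nat) < ((b : Option String), 4).2) = True by simp, if_true]
        rw [pvBest_two]
        simp [List.find?, h1, h2]
      · by_cases h3 : p3 m
        · have hr : pvRank p1 p2 p3 m = 3 := by simp [pvRank, h1, h2, h3]
          rw [hr]; simp only [show ((3:Nat) < ((b : Option String), 4).2) = True by simp, if_true]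
          rw [pvBest_three]
          simp [List.find?, h1, h2, h3]
        · have hr : pvRank p1 p2 p3 m = 4 := by simp [pvRank, h1, h2, h3]
          have h : ¬ pvRank p1 p2 p3 m < ((b : Option String), 4).2 := by rw [hr]; simp
          rw [if_neg h, ih]; simp [List.find?, h1, h2, h3]

-- ===== VERDICT (by name: the statement is the Claim_ definition above) =====
theorem normalize_map_name_spec : Claim_equal_normalize_map_name := by
  intro name _
  unfold Spec_normalize_map_name normalize_map_name normalize_map_name_alt
  cases name with
  | none => rfl
  | some s =>
    by_cases hs : s = ""
    · simp [hs]
    · simp only [hs, if_false]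
      rw [pvBest_four]
      simp [pvSqueeze]
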